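-- pv_equiv track=rewrite | github.com/Jorgepastorr/calculadora_subneting | subneting.py | bits_para_red
-- ===== SOURCE A (Python) =====
-- def bits_para_red(num_redes, host=None):
--     """
--     F. dado un numero de redes calcula el numero de bits que necesita para dichas redes
--     num_redes: numero de redes
--     host: por defecto None, si se activa con True, num_redes se convierte en bits, \
--         calcula numero de hosts permitidos con dichos bits.
--
--     bits_para_red( int(num_redes), opcional True )
--     return int
--     """
--     redes_no_permitidas = 0
--     if host == True:
--         redes_no_permitidas = 2
--
--     bits = 0
--     while num_redes > ( 2 **  bits - redes_no_permitidas ):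
--         bits += 1
--
--     return bits
-- ===== SOURCE B (Python) =====
-- def bits_para_red(num_redes, host=None):
--     # Closed form: smallest bits with 2**bits >= num_redes (+2 when host==True).
--     n = num_redes + (2 if host == True else 0)
--     return 0 if n <= 1 else (n - 1).bit_length()
-- ===== Notes on version B (the rewrite author's own statement) =====
-- stated objective: faster
-- what changed: Replaced the incremental doubling while-loop with a direct O(1) closed form: bits = (num_redes + offset - 1).bit_length() when that sum exceeds 1, else 0.
import Mathlib
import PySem

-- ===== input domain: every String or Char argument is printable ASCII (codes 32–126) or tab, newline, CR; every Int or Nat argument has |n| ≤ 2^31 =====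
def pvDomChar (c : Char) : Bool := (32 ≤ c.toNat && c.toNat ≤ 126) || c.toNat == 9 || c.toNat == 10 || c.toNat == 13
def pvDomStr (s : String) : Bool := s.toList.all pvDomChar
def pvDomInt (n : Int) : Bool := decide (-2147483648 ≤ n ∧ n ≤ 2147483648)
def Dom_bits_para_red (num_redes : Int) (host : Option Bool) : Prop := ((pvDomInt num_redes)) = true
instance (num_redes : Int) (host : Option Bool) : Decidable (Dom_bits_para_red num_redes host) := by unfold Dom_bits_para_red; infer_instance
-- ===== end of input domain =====

-- B replaces A's incremental doubling loop by the O(1) closed form bit_length(num_redes + offset - 1).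

-- ===== PORT A =====
-- the while loop: keeps incrementing bits while num_redes > 2**bits - redes_no_permitidas
def bitsLoopA (num_redes r : Int) (bits : Nat) : Nat :=
  if num_redes > (2:Int)^bits - r then bitsLoopA num_redes r (bits+1) else bits
termination_by (num_redes + r - (2:Int)^bits).toNat
decreasing_by
  have h1 : (2:Int)^bits < (2:Int)^(bits+1) := by
    have : (0:Int) < (2:Int)^bits := by positivity
    rw [pow_succ]; omega
  have h2 : (0:Int) < (2:Int)^bits := by positivity
  omega

def bits_para_red (num_redes : Int) (host : Option Bool) : Int :=
  let redes_no_permitidas : Int := if host == some true then 2 else 0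
  (bitsLoopA num_redes redes_no_permitidas 0 : Int)

-- ===== PORT B =====
def bits_para_red_alt (num_redes : Int) (host : Option Bool) : Int :=
  let n : Int := num_redes + (if host == some true then 2 else 0)
  if n ≤ 1 then 0 else ((Nat.log2 (n - 1).toNat) + 1 : Int)

-- ===== PRECONDITION & SPEC =====
def Spec_bits_para_red (num_redes : Int) (host : Option Bool) (out : Int) : Prop := out = bits_para_red_alt num_redes host
instance (num_redes : Int) (host : Option Bool) (out : Int) : Decidable (Spec_bits_para_red num_redes host out) := by unfold Spec_bits_para_red; infer_instance

-- ===== CLAIM (what is proved, stated in full; the proofs are below) =====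
def Claim_equal_bits_para_red : Prop := ∀ (num_redes : Int) (host : Option Bool), Dom_bits_para_red num_redes host → Spec_bits_para_red num_redes host (bits_para_red num_redes host)

-- ===== LEMMAS AND PROOFS =====

-- if N ≤ 2^b, N > 2^c for all bits ≤ c < b, then the loop started at bits returns b
theorem bitsLoopA_eq (num_redes r : Int) (b : Nat) :
    ∀ bits : Nat, bits ≤ b → num_redes + r ≤ (2:Int)^b →
    (∀ c : Nat, bits ≤ c → c < b → (2:Int)^c < num_redes + r) →
    bitsLoopA num_redes r bits = b := by
  intro bits
  induction hfix : b - bits generalizing bits with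
  | zero =>
    intro hle hub _
    have hbeq : bits = b := by omega
    subst hbeq
    rw [bitsLoopA]
    have hnot : ¬ (num_redes > (2:Int)^bits - r) := by omega
    rw [if_neg hnot]
  | succ k ih =>
    intro hle hub hlb
    have hlt : bits < b := by omega
    have hcond : (2:Int)^bits < num_redes + r := hlb bits le_rfl hlt
    rw [bitsLoopA]
    rw [if_pos (by omega)]
    exact ih (bits+1) (by omega) (by omega) hub (fun c hc1 hc2 => hlb c (by omega) hc2)

theorem loop_closed_form (num_redes r : Int) :
    (bitsLoopA num_redes r 0 : Int) =
      (if num_redes + r ≤ 1 then 0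
       else ((Nat.log2 (num_redes + r - 1).toNat) + 1 : Int)) := by
  set N : Int := num_redes + r with hN
  by_cases h1 : N ≤ 1
  · rw [if_pos h1]
    have : bitsLoopA num_redes r 0 = 0 := by
      rw [bitsLoopA]
      have hnot : ¬ (num_redes > (2:Int)^0 - r) := by simp only [pow_zero]; omega
      rw [if_neg hnot]
    simp [this]
  · rw [if_neg h1]
    push_neg at h1
    set m : Nat := (N - 1).toNat with hm
    have hmN : (m : Int) = N - 1 := by omega
    have hm1 : 1 ≤ m := by omega
    have hub : N ≤ (2:Int)^(Nat.log2 m + 1) := by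
      have := Nat.lt_log2_self (n := m)
      have hcast : ((m : Int)) < ((2:Nat)^(Nat.log2 m + 1) : Nat) := by exact_mod_cast this
      push_cast at hcast
      omega
    have hlb : ∀ c : Nat, 0 ≤ c → c < Nat.log2 m + 1 → (2:Int)^c < N := by
      intro c _ hc
      have hcle : c ≤ Nat.log2 m := by omega
      have h2 : (2:Nat)^c ≤ (2:Nat)^(Nat.log2 m) := Nat.pow_le_pow_right (by omega) hcle
      have h3 : (2:Nat)^(Nat.log2 m) ≤ m := Nat.log2_self_le (by omega)
      have : (2:Nat)^c ≤ m := le_trans h2 h3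
      have hcast : ((2:Nat)^c : Int) ≤ (m : Int) := by exact_mod_cast this
      push_cast at hcast
      omega
    have := bitsLoopA_eq num_redes r (Nat.log2 m + 1) 0 (by omega) (by omega) hlb
    rw [this]; push_cast; ring

-- ===== VERDICT (by name: the statement is the Claim_ definition above) =====
theorem bits_para_red_spec : Claim_equal_bits_para_red := by
  intro num_redes host _
  unfold Spec_bits_para_red bits_para_red bits_para_red_alt
  cases host with
  | none => simpa using loop_closed_form num_redes 0
  | some b =>
    cases b with
    | false => simpa using loop_closed_form num_redes 0
    | true => simpa using loop_closed_form num_redes 2
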